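-- pv_equiv track=rewrite | github.com/pypi-data/pypi-mirror-61 | packages/NumFunc/NumFunc-1.0.0-py3-none-any.whl/NumFunc/__init__.py | primedigitcount
-- ===== SOURCE A (Python) =====
-- def remainder(a,b):
--     rem=a%b
--     return(rem)
--
-- def floordiv(a,b):
--     div=a//b
--     return(div)
--
-- def isprime(n):
--     if n<=1:
--         return False
--
--     if n<=3:
--         return True
--
--     if (n%2==0 or n%3==0):
--         return False
--     i=5
--     while(i * i<=n):
--         if(n%i==0 or n%(i+2)==0):
--             return False
--
--         i=i+6
--     return True
--
-- def primedigitcount(n):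
--     x=0
--     while(n>0):
--         r=remainder(n,10)
--         c=isprime(r)
--         if c == True:
--             x=x+1
--         n=floordiv(n,10)
--     return(x)
-- ===== SOURCE B (Python) =====
-- def primedigitcount(n):
--     if n <= 0:
--         return 0
--     return sum(1 for c in str(n) if c in '2357')
-- ===== Notes on version B (the rewrite author's own statement) =====
-- stated objective: idiomatic
-- what changed: B converts n to its decimal string once and counts the characters that are prime digits, replacing A's remainder/floor-division digit loop that runs trial-division primality on each digit.
import Mathlib
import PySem

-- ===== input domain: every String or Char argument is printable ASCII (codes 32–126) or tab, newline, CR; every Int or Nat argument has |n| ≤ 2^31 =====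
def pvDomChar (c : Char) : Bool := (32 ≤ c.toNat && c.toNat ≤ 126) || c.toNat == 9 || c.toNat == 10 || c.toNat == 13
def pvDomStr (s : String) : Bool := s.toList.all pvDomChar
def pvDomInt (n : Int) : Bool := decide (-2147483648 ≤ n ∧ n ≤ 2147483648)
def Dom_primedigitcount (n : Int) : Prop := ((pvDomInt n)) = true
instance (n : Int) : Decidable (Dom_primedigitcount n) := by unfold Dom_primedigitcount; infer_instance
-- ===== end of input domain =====

-- B replaces A's %10-and-//10 digit loop with trial-division primality per digit by one
-- pass over str(n) counting characters in '2357' (idiomatic; same return value everywhere).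

-- ===== PORT A =====
def pvRemainder (a b : Int) : Int := PySem.Int.mod a b

def pvFloordiv (a b : Int) : Int := PySem.Int.floordiv a b

-- the 'while i*i <= n' loop of isprime; i is always 5, 11, 17, … (nonnegative), kept as Nat
def pvIsprimeLoop (n : Int) (i : Nat) : Bool :=
  if h : (i : Int) * (i : Int) ≤ n then
    if PySem.Int.mod n i = 0 ∨ PySem.Int.mod n ((i : Int) + 2) = 0 then false
    else pvIsprimeLoop n (i + 6)
  else true
termination_by n.toNat + 1 - i
decreasing_by
  rcases Nat.eq_zero_or_pos i with hi | hi
  · subst hi; omega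
  · have h1 : (i : Int) ≤ (i : Int) * (i : Int) := le_mul_of_one_le_left (by positivity) (by exact_mod_cast hi)
    have h2 : (i : Int) ≤ n := le_trans h1 h
    omega

def pvIsprime (n : Int) : Bool :=
  if n ≤ 1 then false
  else if n ≤ 3 then true
  else if PySem.Int.mod n 2 = 0 ∨ PySem.Int.mod n 3 = 0 then false
  else pvIsprimeLoop n 5

-- the 'while n > 0' loop of primedigitcount, with accumulator x
def pvPdcLoop (n x : Int) : Int :=
  if h : n > 0 then
    pvPdcLoop (pvFloordiv n 10)
      (if pvIsprime (pvRemainder n 10) = true then x + 1 else x)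
  else x
termination_by n.toNat
decreasing_by
  have h10 : pvFloordiv n 10 = n / 10 := PySem.Int.floordiv_eq_ediv_of_pos (by norm_num)
  rw [h10]; omega

def primedigitcount (n : Int) : Int := pvPdcLoop n 0

-- ===== PORT B =====
def primedigitcount_alt (n : Int) : Int :=
  if n ≤ 0 then 0
  else ((PySem.Int.toStr n).toList.countP (fun c => ['2', '3', '5', '7'].contains c) : Int)

-- ===== PRECONDITION & SPEC =====
def Spec_primedigitcount (n : Int) (out : Int) : Prop := out = primedigitcount_alt n
instance (n : Int) (out : Int) : Decidable (Spec_primedigitcount n out) := by unfold Spec_primedigitcount; infer_instance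

-- ===== CLAIM (what is proved, stated in full; the proofs are below) =====
def Claim_equal_primedigitcount : Prop := ∀ (n : Int), Dom_primedigitcount n → Spec_primedigitcount n (primedigitcount n)

-- ===== LEMMAS AND PROOFS =====

-- reference count of prime digits of a natural number (proof-side only)
def pvPrimCount (m : Nat) : Nat :=
  if m = 0 then 0
  else (if m % 10 ∈ [2, 3, 5, 7] then 1 else 0) + pvPrimCount (m / 10)
decreasing_by omega

lemma pvIsprime_digit (d : Nat) (hd : d < 10) :
    pvIsprime (d : Int) = decide (d ∈ [2, 3, 5, 7]) := by
  interval_cases d <;> simp [pvIsprime, pvIsprimeLoop, PySem.Int.mod]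

lemma pvContains_digitChar (d : Nat) (hd : d < 10) :
    (['2', '3', '5', '7'].contains (Nat.digitChar d)) = decide (d ∈ [2, 3, 5, 7]) := by
  interval_cases d <;> decide

lemma pvPdcLoop_eq (n x : Int) : pvPdcLoop n x = x + (pvPrimCount n.toNat : Int) := by
  induction n, x using pvPdcLoop.induct with
  | case1 n x h ih =>
    rw [pvPdcLoop]
    simp only [dite_eq_ite] at ih
    simp only [h, dif_pos]
    rw [ih]
    have hmod : pvRemainder n 10 = ((n.toNat % 10 : Nat) : Int) := by
      simp only [pvRemainder]
      rw [PySem.Int.mod_eq_emod_of_pos (by norm_num)]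
      omega
    have hdiv : (pvFloordiv n 10).toNat = n.toNat / 10 := by
      have h10 : pvFloordiv n 10 = n / 10 := PySem.Int.floordiv_eq_ediv_of_pos (by norm_num)
      rw [h10]; omega
    rw [hmod, hdiv, pvIsprime_digit (n.toNat % 10) (by omega)]
    conv_rhs => rw [pvPrimCount]
    have hne : n.toNat ≠ 0 := by omega
    simp only [hne, if_neg, if_false]
    by_cases hp : n.toNat % 10 ∈ [2, 3, 5, 7] <;> simp [hp] <;> push_cast <;> ring
  | case2 n x h =>
    rw [pvPdcLoop]
    have : n.toNat = 0 := by omega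
    simp [h, this, pvPrimCount]

lemma pvPrimCount_zero : pvPrimCount 0 = 0 := by
  rw [pvPrimCount]; simp

lemma pvCountP_toDigitsCore (f : Nat) :
    ∀ (m : Nat) (l : List Char), 0 < m → m < f →
      (Nat.toDigitsCore 10 f m l).countP (fun c => ['2', '3', '5', '7'].contains c) =
        pvPrimCount m + l.countP (fun c => ['2', '3', '5', '7'].contains c) := by
  induction f with
  | zero => intro m l hm hf; omega
  | succ f ih =>
    intro m l hm hf
    simp only [Nat.toDigitsCore]
    by_cases hq : m / 10 = 0
    · simp only [hq, if_pos]
      rw [List.countP_cons, pvContains_digitChar (m % 10) (by omega)]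
      conv_rhs => rw [pvPrimCount]
      have hne : m ≠ 0 := by omega
      simp only [hne, if_neg, if_false, hq, pvPrimCount_zero]
      by_cases hp : m % 10 ∈ [2, 3, 5, 7] <;> simp [hp] <;> omega
    · simp only [hq, if_neg, if_false]
      rw [ih (m / 10) _ (by omega) (by omega)]
      rw [List.countP_cons, pvContains_digitChar (m % 10) (by omega)]
      conv_rhs => rw [pvPrimCount]
      have hne : m ≠ 0 := by omega
      simp only [hne, if_neg, if_false]
      by_cases hp : m % 10 ∈ [2, 3, 5, 7] <;> simp [hp] <;> omega

lemma pvAlt_eq (n : Int) : primedigitcount_alt n = (pvPrimCount n.toNat : Int) := by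
  unfold primedigitcount_alt
  by_cases h : n ≤ 0
  · have : n.toNat = 0 := by omega
    simp [h, this, pvPrimCount]
  · simp only [h, if_neg, if_false]
    rw [PySem.Int.toList_toStr]
    have hneg : ¬ n < 0 := by omega
    simp only [PySem.Int.toChars, hneg, if_neg, if_false]
    rw [Nat.toDigits]
    rw [pvCountP_toDigitsCore (n.toNat + 1) n.toNat [] (by omega) (by omega)]
    simp

-- ===== VERDICT (by name: the statement is the Claim_ definition above) =====
theorem primedigitcount_spec : Claim_equal_primedigitcount := by
  intro n _
  unfold Spec_primedigitcount primedigitcount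
  rw [pvPdcLoop_eq, pvAlt_eq]
  simp
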